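-- pv_equiv track=rewrite | github.com/mik11231/python | advent2024/Day10/day10_part2.py | solve
-- ===== SOURCE A (Python) =====
-- from functools import lru_cache
--
-- def solve(s: str) -> int:
--     """Return the sum of ratings (distinct trail counts) of all trailheads."""
--     grid = s.strip().splitlines()
--     rows, cols = len(grid), len(grid[0])
--     heights = [[int(ch) for ch in row] for row in grid]
--
--     @lru_cache(maxsize=None)
--     def count_trails(r: int, c: int) -> int:
--         if heights[r][c] == 9:
--             return 1
--         total = 0
--         for dr, dc in ((-1, 0), (1, 0), (0, -1), (0, 1)):
--             nr, nc = r + dr, c + dc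
--             if (0 <= nr < rows and 0 <= nc < cols
--                     and heights[nr][nc] == heights[r][c] + 1):
--                 total += count_trails(nr, nc)
--         return total
--
--     return sum(
--         count_trails(r, c)
--         for r in range(rows) for c in range(cols)
--         if heights[r][c] == 0
--     )
-- ===== SOURCE B (Python) =====
-- def solve(s: str) -> int:
--     """Return the sum of ratings (distinct trail counts) of all trailheads."""
--     grid = s.strip().splitlines()
--     rows, cols = len(grid), len(grid[0])
--     heights = [[int(ch) for ch in row] for row in grid]
--
--     # bottom-up tabulation: rating of a cell of height h is the sum of the
--     # ratings of its height-(h+1) orthogonal neighbours; height-9 cells rate 1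
--     rating = [[1 if heights[r][c] == 9 else 0 for c in range(cols)]
--               for r in range(rows)]
--     for h in range(8, -1, -1):
--         for r in range(rows):
--             for c in range(cols):
--                 if heights[r][c] == h:
--                     rating[r][c] = sum(
--                         rating[nr][nc]
--                         for nr, nc in ((r - 1, c), (r + 1, c), (r, c - 1), (r, c + 1))
--                         if 0 <= nr < rows and 0 <= nc < cols
--                         and heights[nr][nc] == h + 1
--                     )
--     return sum(rating[r][c]
--                for r in range(rows) for c in range(cols)
--                if heights[r][c] == 0)
-- ===== Notes on version B (the rewrite author's own statement) =====
-- stated objective: alternative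
-- what changed: Replaces A's top-down lru_cache-memoized recursion over trails with bottom-up dynamic programming: a rating table seeded at height-9 cells and filled for heights 8 down to 0, then summed over trailheads.
import Mathlib
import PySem

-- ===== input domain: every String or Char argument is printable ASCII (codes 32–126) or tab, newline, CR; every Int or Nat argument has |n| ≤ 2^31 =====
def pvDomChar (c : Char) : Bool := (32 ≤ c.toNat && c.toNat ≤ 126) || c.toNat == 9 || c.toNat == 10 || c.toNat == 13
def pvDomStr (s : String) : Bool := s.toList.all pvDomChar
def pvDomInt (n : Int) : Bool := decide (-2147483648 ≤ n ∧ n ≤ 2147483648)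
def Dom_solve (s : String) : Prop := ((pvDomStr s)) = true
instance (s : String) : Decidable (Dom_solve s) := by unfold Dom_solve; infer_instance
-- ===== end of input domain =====

-- B replaces A's memoized recursion by bottom-up tabulation over heights 9,8,…,0 (alternative decomposition, same asymptotic cost).

-- ===== PORT A =====
-- shared parsing (both Pythons compute grid/rows/cols/heights identically)
def pvGrid (s : String) : List String := PySem.Str.splitlines (PySem.Str.strip s)

def pvHeights (grid : List String) : List (List Int) :=
  grid.map (fun row => row.toList.map (fun ch => (PySem.Int.ofChars? [ch]).getD 0))

-- heights[r][c] (indices are in range on every access made under Pre_solve; the default is never read there)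
def pvAt (hs : List (List Int)) (r c : Int) : Int :=
  PySem.List.pyGetD (PySem.List.pyGetD hs r []) c 0

def pvDirs : List (Int × Int) := [(-1, 0), (1, 0), (0, -1), (0, 1)]

-- count_trails: recursion on a fuel bounding the depth (each call strictly increases the height,
-- heights are 0..9 under Pre_solve, so fuel 10 at a height-0 cell is never exhausted)
def countTrails (hs : List (List Int)) (rows cols : Int) : Nat → Int → Int → Int
  | 0, _, _ => 0
  | fuel + 1, r, c =>
    let h := pvAt hs r c
    if h = 9 then 1
    else
      pvDirs.foldl (fun total d =>
        let nr := r + d.1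
        let nc := c + d.2
        if 0 ≤ nr ∧ nr < rows ∧ 0 ≤ nc ∧ nc < cols ∧ pvAt hs nr nc = h + 1 then
          total + countTrails hs rows cols fuel nr nc
        else total) 0

def solve (s : String) : Int :=
  let grid := pvGrid s
  let rows : Int := grid.length
  let cols : Int := PySem.Str.len (PySem.List.pyGetD grid 0 "")
  let hs := pvHeights grid
  (PySem.List.pyRange 0 rows 1).foldl (fun acc r =>
    (PySem.List.pyRange 0 cols 1).foldl (fun acc c =>
      if pvAt hs r c = 0 then acc + countTrails hs rows cols 10 r c else acc) acc) 0

-- ===== PORT B =====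
-- sum of ratings of the height-(h+1) in-bounds orthogonal neighbours, read from the table
def nbrSum (hs tab : List (List Int)) (rows cols r c target : Int) : Int :=
  pvDirs.foldl (fun acc d =>
    let nr := r + d.1
    let nc := c + d.2
    if 0 ≤ nr ∧ nr < rows ∧ 0 ≤ nc ∧ nc < cols ∧ pvAt hs nr nc = target then
      acc + pvAt tab nr nc
    else acc) 0

-- one pass of Source B's h-loop (Source B updates rating in place, but a pass writes only height-h cells
-- and reads only height-(h+1) cells, which are disjoint, so building the pass's table from the
-- previous table is the same computation)
def ratingPass (hs : List (List Int)) (rows cols : Int) (tab : List (List Int)) (h : Int) :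
    List (List Int) :=
  (PySem.List.pyRange 0 rows 1).map (fun r =>
    (PySem.List.pyRange 0 cols 1).map (fun c =>
      if pvAt hs r c = h then nbrSum hs tab rows cols r c (h + 1) else pvAt tab r c))

def solve_alt (s : String) : Int :=
  let grid := pvGrid s
  let rows : Int := grid.length
  let cols : Int := PySem.Str.len (PySem.List.pyGetD grid 0 "")
  let hs := pvHeights grid
  let init : List (List Int) :=
    (PySem.List.pyRange 0 rows 1).map (fun r =>
      (PySem.List.pyRange 0 cols 1).map (fun c => if pvAt hs r c = 9 then 1 else 0))
  let tab := (PySem.List.pyRange 8 (-1) (-1)).foldl (ratingPass hs rows cols) init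
  (PySem.List.pyRange 0 rows 1).foldl (fun acc r =>
    (PySem.List.pyRange 0 cols 1).foldl (fun acc c =>
      if pvAt hs r c = 0 then acc + pvAt tab r c else acc) acc) 0

-- ===== PRECONDITION & SPEC =====
-- Pre_solve: exactly the inputs where the Python A returns: the stripped input is nonempty, every
-- line is at least as long as the first (a shorter line gives IndexError) and every character of
-- every line is a decimal digit (int(ch) raises ValueError otherwise).
def Pre_solve (s : String) : Prop :=
  pvGrid s ≠ [] ∧
  ((pvGrid s).all (fun row =>
    decide ((PySem.List.pyGetD (pvGrid s) 0 "").toList.length ≤ row.toList.length) &&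
    row.toList.all (fun ch => decide ('0' ≤ ch) && decide (ch ≤ '9')))) = true

instance (s : String) : Decidable (Pre_solve s) := by unfold Pre_solve; infer_instance

def pvWitness_solve : String := "0123\n1234\n8765\n9876"

def Spec_solve (s : String) (out : Int) : Prop := out = solve_alt s
instance (s : String) (out : Int) : Decidable (Spec_solve s out) := by unfold Spec_solve; infer_instance

-- ===== CLAIM (what is proved, stated in full; the proofs are below) =====
def Claim_equal_solve : Prop := ∀ (s : String), Dom_solve s → Pre_solve s → Spec_solve s (solve s)

-- ===== LEMMAS AND PROOFS =====

def pvIB (rows cols r c : Int) : Prop := 0 ≤ r ∧ r < rows ∧ 0 ≤ c ∧ c < cols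

lemma pvDigit_bound {ch : Char} (h1 : '0' ≤ ch) (h2 : ch ≤ '9') :
    0 ≤ (PySem.Int.ofChars? [ch]).getD 0 ∧ (PySem.Int.ofChars? [ch]).getD 0 ≤ 9 := by
  have h1' : 48 ≤ ch.toNat := Nat.succ_le_of_lt h1
  have h2' : ch.toNat ≤ 57 := h2
  have hof := Char.ofNat_toNat ch
  have : ch.toNat = 48 ∨ ch.toNat = 49 ∨ ch.toNat = 50 ∨ ch.toNat = 51 ∨ ch.toNat = 52 ∨
      ch.toNat = 53 ∨ ch.toNat = 54 ∨ ch.toNat = 55 ∨ ch.toNat = 56 ∨ ch.toNat = 57 := by omega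
  rcases this with h|h|h|h|h|h|h|h|h|h <;> rw [h] at hof <;> rw [← hof] <;> decide

-- fuel irrelevance of countTrails once the fuel covers the remaining climb
lemma pvCount_stable (hs : List (List Int)) (rows cols : Int)
    (hb : ∀ r c, pvIB rows cols r c → 0 ≤ pvAt hs r c ∧ pvAt hs r c ≤ 9) :
    ∀ (f g : Nat) (r c : Int), pvIB rows cols r c →
      10 - pvAt hs r c ≤ (f : Int) → 10 - pvAt hs r c ≤ (g : Int) →
      countTrails hs rows cols f r c = countTrails hs rows cols g r c := by
  intro f
  induction f with
  | zero =>
    intro g r c hib hf _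
    have := (hb r c hib).2
    exfalso; push_cast at hf; omega
  | succ f ih =>
    intro g r c hib hf hg
    obtain ⟨g', rfl⟩ : ∃ g', g = g' + 1 := by
      cases g with
      | zero => exfalso; have := (hb r c hib).2; push_cast at hg; omega
      | succ g' => exact ⟨g', rfl⟩
    simp only [countTrails]
    by_cases h9 : pvAt hs r c = 9
    · simp [h9]
    · rw [if_neg h9, if_neg h9]
      apply PySem.List.foldl_congr_mem
      intro acc d _
      by_cases hc : 0 ≤ r + d.1 ∧ r + d.1 < rows ∧ 0 ≤ c + d.2 ∧ c + d.2 < cols ∧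
          pvAt hs (r + d.1) (c + d.2) = pvAt hs r c + 1
      · rw [if_pos hc, if_pos hc]
        have hib' : pvIB rows cols (r + d.1) (c + d.2) := ⟨hc.1, hc.2.1, hc.2.2.1, hc.2.2.2.1⟩
        have h0 := (hb r c hib).1
        congr 1
        apply ih g' _ _ hib' <;> rw [hc.2.2.2.2] <;> push_cast at hf hg ⊢ <;> omega
      · rw [if_neg hc, if_neg hc]

lemma pvCount_unfold (hs : List (List Int)) (rows cols : Int)
    (hb : ∀ r c, pvIB rows cols r c → 0 ≤ pvAt hs r c ∧ pvAt hs r c ≤ 9)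
    (r c : Int) (hib : pvIB rows cols r c) (h9 : pvAt hs r c ≠ 9) :
    countTrails hs rows cols 10 r c =
      pvDirs.foldl (fun total d =>
        if 0 ≤ r + d.1 ∧ r + d.1 < rows ∧ 0 ≤ c + d.2 ∧ c + d.2 < cols ∧
            pvAt hs (r + d.1) (c + d.2) = pvAt hs r c + 1 then
          total + countTrails hs rows cols 10 (r + d.1) (c + d.2)
        else total) 0 := by
  conv_lhs => rw [show (10:Nat) = 9 + 1 from rfl]; rw [countTrails]
  rw [if_neg h9]
  apply PySem.List.foldl_congr_mem
  intro acc d _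
  by_cases hc : 0 ≤ r + d.1 ∧ r + d.1 < rows ∧ 0 ≤ c + d.2 ∧ c + d.2 < cols ∧
      pvAt hs (r + d.1) (c + d.2) = pvAt hs r c + 1
  · rw [if_pos hc, if_pos hc]
    have hib' : pvIB rows cols (r + d.1) (c + d.2) := ⟨hc.1, hc.2.1, hc.2.2.1, hc.2.2.2.1⟩
    have h0 := (hb r c hib).1
    rw [pvCount_stable hs rows cols hb 9 10 _ _ hib'
      (by rw [hc.2.2.2.2]; push_cast; omega) (by rw [hc.2.2.2.2]; push_cast; omega)]
  · rw [if_neg hc, if_neg hc]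

lemma pvAt_table (rows cols : Int) (f : Int → Int → Int) (r c : Int)
    (hib : pvIB rows cols r c) :
    pvAt ((PySem.List.pyRange 0 rows 1).map (fun r =>
      (PySem.List.pyRange 0 cols 1).map (fun c => f r c))) r c = f r c := by
  unfold pvAt
  rw [PySem.List.pyGetD_map_pyRange_of_nonneg _ _ _ _ hib.1 hib.2.1]
  rw [PySem.List.pyGetD_map_pyRange_of_nonneg _ _ _ _ hib.2.2.1 hib.2.2.2]

-- the invariant of B's tabulation: after all heights ≥ m are processed, processed cells hold the
-- trail count and unprocessed cells still hold 0
def pvInv (hs tab : List (List Int)) (rows cols m : Int) : Prop :=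
  ∀ r c, pvIB rows cols r c →
    (m ≤ pvAt hs r c → pvAt tab r c = countTrails hs rows cols 10 r c) ∧
    (pvAt hs r c < m → pvAt tab r c = 0)

lemma pvInv_init (hs : List (List Int)) (rows cols : Int)
    (hb : ∀ r c, pvIB rows cols r c → 0 ≤ pvAt hs r c ∧ pvAt hs r c ≤ 9) :
    pvInv hs ((PySem.List.pyRange 0 rows 1).map (fun r =>
      (PySem.List.pyRange 0 cols 1).map (fun c => if pvAt hs r c = 9 then 1 else 0)))
      rows cols 9 := by
  intro r c hib
  rw [pvAt_table rows cols _ r c hib]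
  constructor
  · intro h9
    have h9' : pvAt hs r c = 9 := le_antisymm (hb r c hib).2 h9
    rw [if_pos h9']
    rw [show (10:Nat) = 9 + 1 from rfl, countTrails, if_pos h9']
  · intro hlt
    rw [if_neg (by omega)]

lemma pvInv_step (hs : List (List Int)) (rows cols : Int)
    (hb : ∀ r c, pvIB rows cols r c → 0 ≤ pvAt hs r c ∧ pvAt hs r c ≤ 9)
    (tab : List (List Int)) (k : Int) (hk0 : 0 ≤ k) (hk8 : k ≤ 8)
    (hinv : pvInv hs tab rows cols (k + 1)) :
    pvInv hs (ratingPass hs rows cols tab k) rows cols k := by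
  intro r c hib
  unfold ratingPass
  rw [pvAt_table rows cols _ r c hib]
  constructor
  · intro hge
    by_cases hk : pvAt hs r c = k
    · rw [if_pos hk]
      rw [pvCount_unfold hs rows cols hb r c hib (by omega)]
      unfold nbrSum
      apply PySem.List.foldl_congr_mem
      intro acc d _
      by_cases hc : 0 ≤ r + d.1 ∧ r + d.1 < rows ∧ 0 ≤ c + d.2 ∧ c + d.2 < cols ∧
          pvAt hs (r + d.1) (c + d.2) = pvAt hs r c + 1
      · rw [if_pos (by rw [← hk]; exact hc), if_pos hc]
        have hib' : pvIB rows cols (r + d.1) (c + d.2) := ⟨hc.1, hc.2.1, hc.2.2.1, hc.2.2.2.1⟩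
        rw [(hinv _ _ hib').1 (by rw [hc.2.2.2.2, hk])]
      · rw [if_neg (by rw [← hk]; exact hc), if_neg hc]
    · rw [if_neg hk]
      exact (hinv r c hib).1 (by omega)
  · intro hlt
    rw [if_neg (by omega)]
    exact (hinv r c hib).2 (by omega)

lemma pvRange_down_snoc (n : Nat) (hn : n ≤ 8) :
    PySem.List.pyRange 8 (8 - (n : Int) - 1) (-1) =
      PySem.List.pyRange 8 (8 - (n : Int)) (-1) ++ [8 - (n : Int)] := by
  rw [PySem.List.pyRange_neg_one_eq_reverse, PySem.List.pyRange_neg_one_eq_reverse]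
  rw [show (8 - (n : Int) - 1 + 1) = 8 - (n : Int) from by omega]
  rw [PySem.List.pyRange_one_cons (show 8 - (n : Int) < 8 + 1 by omega)]
  rw [List.reverse_cons]

lemma pvInv_fold (hs : List (List Int)) (rows cols : Int)
    (hb : ∀ r c, pvIB rows cols r c → 0 ≤ pvAt hs r c ∧ pvAt hs r c ≤ 9) :
    ∀ n : Nat, n ≤ 9 →
      pvInv hs ((PySem.List.pyRange 8 (8 - (n : Int)) (-1)).foldl
          (ratingPass hs rows cols)
          ((PySem.List.pyRange 0 rows 1).map (fun r =>
            (PySem.List.pyRange 0 cols 1).map (fun c => if pvAt hs r c = 9 then 1 else 0))))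
        rows cols (9 - (n : Int)) := by
  intro n
  induction n with
  | zero =>
    intro _
    rw [show ((8 : Int) - ((0:Nat) : Int)) = 8 from by omega]
    rw [PySem.List.pyRange_neg_one_eq_nil le_rfl]
    rw [List.foldl_nil]
    rw [show ((9 : Int) - ((0:Nat) : Int)) = 9 from by omega]
    exact pvInv_init hs rows cols hb
  | succ n ih =>
    intro hn
    rw [show ((8 : Int) - (((n+1):Nat) : Int)) = 8 - (n : Int) - 1 from by omega]
    rw [pvRange_down_snoc n (by omega), List.foldl_append, List.foldl_cons, List.foldl_nil]
    have hstep := pvInv_step hs rows cols hb _ (8 - (n : Int)) (by omega) (by omega)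
      (by rw [show (8 - (n : Int) + 1) = 9 - (n : Int) from by omega]; exact ih (by omega))
    rw [show ((9 : Int) - (((n+1):Nat) : Int)) = 8 - (n : Int) from by omega]
    exact hstep

-- generic equality of the two summations
lemma pvMain (hs : List (List Int)) (rows cols : Int)
    (hb : ∀ r c, pvIB rows cols r c → 0 ≤ pvAt hs r c ∧ pvAt hs r c ≤ 9) :
    (PySem.List.pyRange 0 rows 1).foldl (fun acc r =>
      (PySem.List.pyRange 0 cols 1).foldl (fun acc c =>
        if pvAt hs r c = 0 then acc + countTrails hs rows cols 10 r c else acc) acc) 0 =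
    (PySem.List.pyRange 0 rows 1).foldl (fun acc r =>
      (PySem.List.pyRange 0 cols 1).foldl (fun acc c =>
        if pvAt hs r c = 0 then acc +
          pvAt ((PySem.List.pyRange 8 (-1) (-1)).foldl (ratingPass hs rows cols)
            ((PySem.List.pyRange 0 rows 1).map (fun r =>
              (PySem.List.pyRange 0 cols 1).map (fun c => if pvAt hs r c = 9 then 1 else 0))))
            r c
        else acc) acc) 0 := by
  have hinv := pvInv_fold hs rows cols hb 9 le_rfl
  rw [show ((8 : Int) - ((9:Nat) : Int)) = -1 from by omega] at hinv
  rw [show ((9 : Int) - ((9:Nat) : Int)) = 0 from by omega] at hinv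
  apply PySem.List.foldl_congr_mem
  intro acc r hr
  apply PySem.List.foldl_congr_mem
  intro acc' c hc
  rw [PySem.List.mem_pyRange_one] at hr hc
  have hib : pvIB rows cols r c := ⟨hr.1, hr.2, hc.1, hc.2⟩
  by_cases h0 : pvAt hs r c = 0
  · rw [if_pos h0, if_pos h0, ((hinv r c hib).1 (by have := (hb r c hib).1; omega)).symm]
  · rw [if_neg h0, if_neg h0]

lemma pvPre_bounds (s : String) (hpre : Pre_solve s) :
    ∀ r c, pvIB ((pvGrid s).length : Int)
        (PySem.Str.len (PySem.List.pyGetD (pvGrid s) 0 "")) r c →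
      0 ≤ pvAt (pvHeights (pvGrid s)) r c ∧ pvAt (pvHeights (pvGrid s)) r c ≤ 9 := by
  obtain ⟨hne, hall⟩ := hpre
  rintro r c ⟨hr0, hrR, hc0, hcC⟩
  have hlen : (pvHeights (pvGrid s)).length = (pvGrid s).length := by
    simp [pvHeights]
  have hrowmem : PySem.List.pyGetD (pvHeights (pvGrid s)) r [] ∈ pvHeights (pvGrid s) :=
    PySem.List.pyGetD_mem _ _ ⟨by omega, by rw [hlen]; exact_mod_cast hrR⟩
  obtain ⟨g, hgmem, hmap⟩ := List.mem_map.1 hrowmem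
  have hg' := List.all_eq_true.mp hall g hgmem
  rw [Bool.and_eq_true] at hg'
  have hcols1 := of_decide_eq_true hg'.1
  have hlenrow : (PySem.List.pyGetD (pvHeights (pvGrid s)) r []).length = g.toList.length := by
    rw [← hmap]; simp
  rw [PySem.Str.len_eq] at hcC
  have hcC' : c < ((PySem.List.pyGetD (pvHeights (pvGrid s)) r []).length : Int) := by
    rw [hlenrow]
    have := hcols1
    omega
  have hentry : pvAt (pvHeights (pvGrid s)) r c ∈
      PySem.List.pyGetD (pvHeights (pvGrid s)) r [] :=
    PySem.List.pyGetD_mem _ _ ⟨by omega, hcC'⟩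
  rw [← hmap] at hentry
  obtain ⟨ch, hchmem, hcheq⟩ := List.mem_map.1 hentry
  have hch := List.all_eq_true.mp hg'.2 ch hchmem
  rw [Bool.and_eq_true] at hch
  rw [← hcheq]
  exact pvDigit_bound (of_decide_eq_true hch.1) (of_decide_eq_true hch.2)

-- ===== VERDICT (by name: the statement is the Claim_ definition above) =====
theorem solve_spec : Claim_equal_solve := by
  intro s _ hpre
  unfold Spec_solve solve solve_alt
  exact pvMain _ _ _ (pvPre_bounds s hpre)
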